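-- pv_equiv track=rewrite | github.com/informalsystems/modelator-py | modelator_py/util/tlc/stdout_to_informal_trace_format.py | split_into_states
-- ===== SOURCE A (Python) =====
-- import typing
--
-- def split_into_states(lines: typing.List[str]) -> typing.List[typing.List[str]]:
--     """
--     Converts a TLA+/ASCII trace string expression into a list of TLA+ state
--     string expressions. Requires removing non-TLA+ ascii from the trace string
--     expression.
--
--     A trace from TLC is a sequence of [header, content] pairs.
--     The headers are not valid TLA+.
--     This function returns a list where each item is valid TLA+ content.
--     """
--     ret = []
--     HEADER = "State "
--     header_cnt = 0
--     header_ix = -1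
--
--     # this is for the case when the invariant is violated in the initial state
--     # then, the counterexample is not prefixed with "State "
--     if len(lines) > 0 and not lines[0].startswith(HEADER):
--         lines = [HEADER] + lines
--     for i, line in enumerate(lines):
--         if line.startswith(HEADER):
--             if 0 < header_cnt:
--                 ret.append(lines[header_ix + 1 : i])
--             header_ix = i
--             header_cnt += 1
--     if 0 < header_cnt:
--         ret.append(lines[header_ix + 1 :])
--
--     return ret
-- ===== SOURCE B (Python) =====
-- import typing
--
-- def split_into_states(lines: typing.List[str]) -> typing.List[typing.List[str]]:
--     """Single-pass splitter: grow the current segment in a buffer instead of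
--     recording header indices and slicing afterwards."""
--     HEADER = "State "
--     if len(lines) > 0 and not lines[0].startswith(HEADER):
--         lines = [HEADER] + lines
--     ret = []
--     current = None
--     for line in lines:
--         if line.startswith(HEADER):
--             if current is not None:
--                 ret.append(current)
--             current = []
--         elif current is not None:
--             current.append(line)
--     if current is not None:
--         ret.append(current)
--     return ret
-- ===== Notes on version B (the rewrite author's own statement) =====
-- stated objective: alternative
-- what changed: B replaces A's index bookkeeping (enumerate, last-header index, slicing lines[header_ix+1:i]) with a single pass that grows the current segment in a buffer (None until the first header) and flushes it at each header and at the end.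
import Mathlib
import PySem

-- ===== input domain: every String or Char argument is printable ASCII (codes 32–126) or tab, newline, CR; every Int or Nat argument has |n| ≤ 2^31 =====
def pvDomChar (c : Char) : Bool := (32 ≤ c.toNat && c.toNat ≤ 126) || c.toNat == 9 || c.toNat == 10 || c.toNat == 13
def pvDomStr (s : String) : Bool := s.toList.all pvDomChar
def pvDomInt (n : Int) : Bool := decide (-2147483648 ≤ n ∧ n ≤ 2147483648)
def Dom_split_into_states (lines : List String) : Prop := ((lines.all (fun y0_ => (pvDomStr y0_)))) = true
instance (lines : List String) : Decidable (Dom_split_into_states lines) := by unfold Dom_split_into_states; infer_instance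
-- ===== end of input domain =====

-- B replaces A's enumerate/last-header-index/slice bookkeeping with a single pass growing the
-- current segment in an Option buffer (alternative decomposition, same cost).


-- ===== PORT A =====
-- state: (ret, header_cnt, header_ix); one fold step of A's `for i, line in enumerate(lines)`
def pvStepA (lines' : List String) (s : List (List String) × Int × Int) (p : Int × String) :
    List (List String) × Int × Int :=
  if PySem.Str.startswith p.2 "State " then
    ((if 0 < s.2.1 then s.1 ++ [PySem.List.slice lines' (some (s.2.2 + 1)) (some p.1)] else s.1),
     s.2.1 + 1, p.1)
  else s

def split_into_states (lines : List String) : List (List String) :=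
  let HEADER := "State "
  let lines' :=
    if 0 < lines.length ∧ ¬ PySem.Str.startswith (PySem.List.pyGetD lines 0 "") HEADER then
      HEADER :: lines
    else lines
  let s := (PySem.List.enumerate lines').foldl (pvStepA lines') ([], 0, -1)
  if 0 < s.2.1 then s.1 ++ [PySem.List.slice lines' (some (s.2.2 + 1)) none] else s.1

-- ===== PORT B =====
-- state: (ret, current buffer); `current = None` before the first header
def pvStepB (s : List (List String) × Option (List String)) (line : String) :
    List (List String) × Option (List String) :=
  if PySem.Str.startswith line "State " then
    ((match s.2 with | some c => s.1 ++ [c] | none => s.1), some [])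
  else
    match s.2 with
    | some c => (s.1, some (c ++ [line]))
    | none => s

def split_into_states_alt (lines : List String) : List (List String) :=
  let HEADER := "State "
  let lines' :=
    if 0 < lines.length ∧ ¬ PySem.Str.startswith (PySem.List.pyGetD lines 0 "") HEADER then
      HEADER :: lines
    else lines
  let s := lines'.foldl pvStepB ([], none)
  match s.2 with | some c => s.1 ++ [c] | none => s.1

-- ===== PRECONDITION & SPEC =====
def Spec_split_into_states (lines : List String) (out : List (List String)) : Prop := out = split_into_states_alt lines
instance (lines : List String) (out : List (List String)) : Decidable (Spec_split_into_states lines out) := by unfold Spec_split_into_states; infer_instance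

-- ===== CLAIM (what is proved, stated in full; the proofs are below) =====
def Claim_equal_split_into_states : Prop := ∀ (lines : List String), Dom_split_into_states lines → Spec_split_into_states lines (split_into_states lines)

-- ===== LEMMAS AND PROOFS =====

-- finalization of each fold's state
def pvFinA (L : List String) (s : List (List String) × Int × Int) : List (List String) :=
  if 0 < s.2.1 then s.1 ++ [PySem.List.slice L (some (s.2.2 + 1)) none] else s.1

def pvFinB (s : List (List String) × Option (List String)) : List (List String) :=
  match s.2 with | some c => s.1 ++ [c] | none => s.1

-- the invariant tying A's (ret, cnt, ix) at position k to B's (ret, current)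
def pvRel (L : List String) (k : Nat) (sa : List (List String) × Int × Int)
    (sb : List (List String) × Option (List String)) : Prop :=
  sa.1 = sb.1 ∧
  ((sa.2.1 = 0 ∧ sb.2 = none) ∨
   (0 < sa.2.1 ∧ ∃ j : Nat, sa.2.2 = (j : Int) - 1 ∧ j ≤ k ∧
      sb.2 = some ((L.drop j).take (k - j))))

theorem pv_main (L : List String) :
    ∀ (rest : List String) (k : Nat) (sa : List (List String) × Int × Int)
      (sb : List (List String) × Option (List String)),
      rest = L.drop k → pvRel L k sa sb →
      pvFinA L ((PySem.List.enumerate rest (k : Int)).foldl (pvStepA L) sa) =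
      pvFinB (rest.foldl pvStepB sb) := by
  intro rest
  induction rest with
  | nil =>
    intro k sa sb hdrop hrel
    simp [PySem.List.enumerate_nil]
    obtain ⟨h1, h2⟩ := hrel
    rcases h2 with ⟨hc, hb⟩ | ⟨hc, j, hix, hjk, hb⟩
    · simp [pvFinA, pvFinB, hb, h1, show ¬ 0 < sa.2.1 by omega]
    · have hlen : L.length ≤ k := by
        have := congrArg List.length hdrop
        simp at this; omega
      simp only [pvFinA, pvFinB, hb, h1, hc, if_pos]
      rw [hix, show (j : Int) - 1 + 1 = (j : Int) by ring,
          PySem.List.slice_from _ (by positivity)]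
      rw [List.take_of_length_le (by simp; omega)]
      simp
  | cons x rest ih =>
    intro k sa sb hdrop hrel
    have hx : L[k]? = some x := by
      have := congrArg (fun l => l[0]?) hdrop
      simpa [List.getElem?_drop] using this.symm
    have hrest : rest = L.drop (k + 1) := by
      have ht := congrArg List.tail hdrop
      rw [List.tail_drop] at ht
      simpa using ht
    have hklen : k < L.length := (List.getElem?_eq_some_iff.mp hx).1
    rw [PySem.List.enumerate_cons]
    simp only [List.foldl_cons]
    obtain ⟨h1, h2⟩ := hrel
    have hsx : PySem.Str.startswith x "State " = PySem.Chars.startswith x.toList ['S', 't', 'a', 't', 'e', ' '] := by simp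
    by_cases hs : PySem.Chars.startswith x.toList ['S', 't', 'a', 't', 'e', ' '] = true
    · -- header line
      apply ih (k + 1) _ _ (by simpa using hrest)
      constructor
      · rcases h2 with ⟨hc, hb⟩ | ⟨hc, j, hix, hjk, hb⟩
        · simp [pvStepA, pvStepB, hs, hb, h1, show ¬ 0 < sa.2.1 by omega]
        · simp only [pvStepA, pvStepB, hb, h1, hc, if_pos]
          rw [hix, show (j : Int) - 1 + 1 = (j : Int) by ring,
              PySem.List.slice_toNat _ (by positivity) (by positivity)]
          simp [hs]
      · right
        refine ⟨?_, k + 1, ?_, le_refl _, ?_⟩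
        · simp only [pvStepA, hsx, hs, if_true]; omega
        · simp only [pvStepA, hsx, hs, if_true]; push_cast; ring
        · simp [pvStepB, hs]
    · -- non-header line
      apply ih (k + 1) _ _ (by simpa using hrest)
      constructor
      · rcases h2 with ⟨hc, hb⟩ | ⟨hc, j, hix, hjk, hb⟩ <;>
          simp [pvStepA, pvStepB, hs, hb, h1]
      · rcases h2 with ⟨hc, hb⟩ | ⟨hc, j, hix, hjk, hb⟩
        · left; simp [pvStepA, pvStepB, hs, hb, hc]
        · right
          refine ⟨by simp [pvStepA, hs]; omega, j, by simp [pvStepA, hs, hix], by omega, ?_⟩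
          simp only [pvStepB, hsx, hb]
          rw [if_neg hs, show k + 1 - j = (k - j) + 1 by omega, List.take_add_one]
          simp [List.getElem?_drop, show j + (k - j) = k by omega, hx]

-- ===== VERDICT (by name: the statement is the Claim_ definition above) =====
theorem split_into_states_spec : Claim_equal_split_into_states := by
  intro lines _
  unfold Spec_split_into_states split_into_states split_into_states_alt
  simp only []
  exact pv_main _ _ 0 ([], 0, -1) ([], none) (by simp) ⟨rfl, Or.inl ⟨rfl, rfl⟩⟩
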